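-- pv_equiv track=rewrite | github.com/TheLokj/WizardEye | src/wizardeye/utils.py | reference_len_from_cigar
-- ===== SOURCE A (Python) =====
-- from typing import Dict, Iterable, List, Optional, Set, Tuple
--
-- def reference_len_from_cigar(cigar: Optional[str], default_k: int) -> int:
-- 	"""Return reference-consuming length from a CIGAR string."""
-- 	if not cigar:
-- 		return default_k
--
-- 	ref_len = 0
-- 	num = []
-- 	for char in cigar:
-- 		if char.isdigit():
-- 			num.append(char)
-- 			continue
-- 		if char in {"M", "D", "N", "=", "X"}:
-- 			try:
-- 				ref_len += int("".join(num))
-- 			except ValueError: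
-- 				pass
-- 		num = []
--
-- 	return ref_len if ref_len > 0 else default_k
-- ===== SOURCE B (Python) =====
-- import re
--
-- def reference_len_from_cigar(cigar, default_k):
--     """Return reference-consuming length from a CIGAR string."""
--     if not cigar:
--         return default_k
--     tokens = re.findall(r"(\d+)(\D)", cigar)
--     ref_len = sum(int(n) for n, op in tokens if op in {"M", "D", "N", "=", "X"})
--     return ref_len if ref_len > 0 else default_k
-- ===== Notes on version B (the rewrite author's own statement) =====
-- stated objective: idiomatic
-- what changed: Replaces the hand-written per-character digit-accumulator state machine (mutable num buffer, try/except) by a single regex tokenization into (count, op) pairs followed by a filtered sum.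
import Mathlib
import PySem

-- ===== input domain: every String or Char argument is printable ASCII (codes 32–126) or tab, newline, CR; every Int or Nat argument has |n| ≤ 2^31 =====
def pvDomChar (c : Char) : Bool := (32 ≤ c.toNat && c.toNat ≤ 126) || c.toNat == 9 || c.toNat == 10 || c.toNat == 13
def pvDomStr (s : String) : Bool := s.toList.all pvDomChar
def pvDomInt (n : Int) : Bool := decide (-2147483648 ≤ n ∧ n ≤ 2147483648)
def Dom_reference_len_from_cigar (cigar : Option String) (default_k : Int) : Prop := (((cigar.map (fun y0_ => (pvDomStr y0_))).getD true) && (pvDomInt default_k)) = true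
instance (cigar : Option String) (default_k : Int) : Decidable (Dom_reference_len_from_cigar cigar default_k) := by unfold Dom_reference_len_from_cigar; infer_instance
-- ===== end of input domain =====

-- B replaces A's per-character digit-accumulator state machine by regex-style
-- tokenization into (count, op) pairs followed by a filtered sum (idiomatic; same cost).

-- ===== PORT A =====
-- A's loop over the characters of cigar: state = (ref_len, num); exact on the ASCII
-- domain, where Python's char.isdigit() is PySem.Chars.isdigit.
def refCigarGoA : List Char → Int → List Char → Int
  | [], ref_len, _ => ref_len
  | c :: rest, ref_len, num =>
    if PySem.Chars.isdigit c then
      refCigarGoA rest ref_len (num ++ [c])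
    else if c = 'M' ∨ c = 'D' ∨ c = 'N' ∨ c = '=' ∨ c = 'X' then
      -- try: ref_len += int("".join(num)) except ValueError: pass
      match PySem.Int.ofStr? (String.mk num) with
      | some v => refCigarGoA rest (ref_len + v) []
      | none => refCigarGoA rest ref_len []
    else
      refCigarGoA rest ref_len []

def reference_len_from_cigar (cigar : Option String) (default_k : Int) : Int :=
  match cigar with
  | none => default_k
  | some s =>
    if s.toList = [] then default_k   -- `if not cigar`
    else
      let ref_len := refCigarGoA s.toList 0 []
      if ref_len > 0 then ref_len else default_k

-- ===== PORT B =====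
-- re.findall(r"(\d+)(\D)", cigar): maximal digit run followed by one non-digit char.
def refCigarTokenize : List Char → List (String × Char)
  | [] => []
  | c :: rest =>
    if PySem.Chars.isdigit c then
      match h : rest.dropWhile PySem.Chars.isdigit with
      | [] => []
      | op :: tl =>
        (String.mk (c :: rest.takeWhile PySem.Chars.isdigit), op) :: refCigarTokenize tl
    else
      refCigarTokenize rest
  termination_by cs => cs.length
  decreasing_by
    · have h1 : (rest.dropWhile PySem.Chars.isdigit).length ≤ rest.length :=
        List.length_dropWhile_le _ _
      rw [h] at h1
      simp at h1 ⊢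
      omega
    · simp

def reference_len_from_cigar_alt (cigar : Option String) (default_k : Int) : Int :=
  match cigar with
  | none => default_k
  | some s =>
    if s.toList = [] then default_k
    else
      -- sum(int(n) for n, op in tokens if op in {"M","D","N","=","X"})
      let ref_len := (refCigarTokenize s.toList).foldl
        (fun acc t =>
          if t.2 = 'M' ∨ t.2 = 'D' ∨ t.2 = 'N' ∨ t.2 = '=' ∨ t.2 = 'X' then
            acc + (PySem.Int.ofStr? t.1).getD 0
          else acc) 0
      if ref_len > 0 then ref_len else default_k

-- ===== PRECONDITION & SPEC =====
def Spec_reference_len_from_cigar (cigar : Option String) (default_k : Int) (out : Int) : Prop := out = reference_len_from_cigar_alt cigar default_k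
instance (cigar : Option String) (default_k : Int) (out : Int) : Decidable (Spec_reference_len_from_cigar cigar default_k out) := by unfold Spec_reference_len_from_cigar; infer_instance

-- ===== CLAIM (what is proved, stated in full; the proofs are below) =====
def Claim_equal_reference_len_from_cigar : Prop := ∀ (cigar : Option String) (default_k : Int), Dom_reference_len_from_cigar cigar default_k → Spec_reference_len_from_cigar cigar default_k (reference_len_from_cigar cigar default_k)

-- ===== LEMMAS AND PROOFS =====

def refCigarScore (toks : List (String × Char)) : Int :=
  toks.foldl
    (fun acc t =>
      if t.2 = 'M' ∨ t.2 = 'D' ∨ t.2 = 'N' ∨ t.2 = '=' ∨ t.2 = 'X' then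
        acc + (PySem.Int.ofStr? t.1).getD 0
      else acc) 0

theorem refCigarScore_foldl (toks : List (String × Char)) (a : Int) :
    toks.foldl
      (fun acc t =>
        if t.2 = 'M' ∨ t.2 = 'D' ∨ t.2 = 'N' ∨ t.2 = '=' ∨ t.2 = 'X' then
          acc + (PySem.Int.ofStr? t.1).getD 0
        else acc) a = a + refCigarScore toks := by
  induction toks generalizing a with
  | nil => simp [refCigarScore]
  | cons t ts ih =>
    simp only [refCigarScore, List.foldl_cons]
    split_ifs
    · rw [ih, ih ((0:Int) + _)]; ring
    · rw [ih, ih 0]; ring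

theorem refCigarTakeWhileAll {α : Type} (p : α → Bool) (xs : List α)
    (h : ∀ x ∈ xs, p x = true) (c : α) (hc : p c = false) (rest : List α) :
    (xs ++ c :: rest).takeWhile p = xs := by
  induction xs with
  | nil => simp [List.takeWhile, hc]
  | cons x xs ih =>
    have hx : p x = true := h x (by simp)
    simp only [List.cons_append, List.takeWhile_cons, hx, if_true]
    rw [ih (fun y hy => h y (by simp [hy]))]

theorem refCigarDropWhileAll {α : Type} (p : α → Bool) (xs : List α)
    (h : ∀ x ∈ xs, p x = true) (c : α) (hc : p c = false) (rest : List α) :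
    (xs ++ c :: rest).dropWhile p = c :: rest := by
  induction xs with
  | nil => simp [List.dropWhile, hc]
  | cons x xs ih =>
    have hx : p x = true := h x (by simp)
    simp only [List.cons_append, List.dropWhile_cons, hx, if_true]
    exact ih (fun y hy => h y (by simp [hy]))

theorem refCigarTokenize_digits (num : List Char)
    (hd : ∀ d ∈ num, PySem.Chars.isdigit d = true) :
    refCigarTokenize num = [] := by
  cases num with
  | nil => rw [refCigarTokenize]
  | cons c rest =>
    have hc : PySem.Chars.isdigit c = true := hd c (by simp)
    have hrest : rest.dropWhile PySem.Chars.isdigit = [] := by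
      rw [List.dropWhile_eq_nil_iff]
      intro x hx; exact hd x (by simp [hx])
    rw [refCigarTokenize, if_pos hc]
    split <;> simp_all

theorem refCigarTokenize_skip (c : Char) (hc : PySem.Chars.isdigit c = false)
    (rest : List Char) :
    refCigarTokenize (c :: rest) = refCigarTokenize rest := by
  rw [refCigarTokenize]
  simp [hc]

theorem refCigarTokenize_run (d : Char) (ds : List Char)
    (hd : ∀ x ∈ d :: ds, PySem.Chars.isdigit x = true)
    (c : Char) (hc : PySem.Chars.isdigit c = false) (rest : List Char) :
    refCigarTokenize (d :: ds ++ c :: rest) =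
      (String.mk (d :: ds), c) :: refCigarTokenize rest := by
  have hds : ∀ x ∈ ds, PySem.Chars.isdigit x = true := fun x hx => hd x (by simp [hx])
  have hdd : PySem.Chars.isdigit d = true := hd d (by simp)
  have htw := refCigarTakeWhileAll PySem.Chars.isdigit ds hds c hc rest
  have hdw := refCigarDropWhileAll PySem.Chars.isdigit ds hds c hc rest
  rw [List.cons_append, refCigarTokenize, if_pos hdd]
  split
  · simp_all
  · rename_i op tl h
    rw [hdw] at h
    cases h
    rw [htw]

theorem refCigarGoA_eq (cs : List Char) :
    ∀ (ref_len : Int) (num : List Char),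
      (∀ d ∈ num, PySem.Chars.isdigit d = true) →
      refCigarGoA cs ref_len num = ref_len + refCigarScore (refCigarTokenize (num ++ cs)) := by
  induction cs with
  | nil =>
    intro ref_len num hd
    rw [refCigarGoA, List.append_nil, refCigarTokenize_digits num hd]
    simp [refCigarScore]
  | cons c rest ih =>
    intro ref_len num hd
    rw [refCigarGoA]
    by_cases hc : PySem.Chars.isdigit c = true
    · rw [if_pos hc, ih ref_len (num ++ [c])
        (by intro d hdm; rcases List.mem_append.mp hdm with h | h
            · exact hd d h
            · simp at h; subst h; exact hc)]
      rw [List.append_assoc]; rfl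
    · rw [if_neg hc]
      have hc' : PySem.Chars.isdigit c = false := by
        cases h : PySem.Chars.isdigit c
        · rfl
        · exact absurd h hc
      by_cases hop : c = 'M' ∨ c = 'D' ∨ c = 'N' ∨ c = '=' ∨ c = 'X'
      · rw [if_pos hop]
        cases num with
        | nil =>
          have hnone : PySem.Int.ofStr? (String.mk ([] : List Char)) = none := by decide
          rw [hnone, List.nil_append, refCigarTokenize_skip c hc' rest]
          exact ih ref_len [] (by simp)
        | cons d ds =>
          rw [refCigarTokenize_run d ds hd c hc' rest]
          simp only [refCigarScore, List.foldl_cons, if_pos hop]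
          rw [refCigarScore_foldl]
          cases h : PySem.Int.ofStr? (String.mk (d :: ds)) with
          | none =>
            simp only [Option.getD_none]
            rw [ih ref_len [] (by simp), List.nil_append]
            simp [refCigarScore]
          | some v =>
            simp only [Option.getD_some]
            rw [ih (ref_len + v) [] (by simp), List.nil_append]
            simp only [refCigarScore]
            ring
      · rw [if_neg hop]
        cases num with
        | nil =>
          rw [List.nil_append, refCigarTokenize_skip c hc' rest]
          exact ih ref_len [] (by simp)
        | cons d ds =>
          rw [refCigarTokenize_run d ds hd c hc' rest]
          simp only [refCigarScore, List.foldl_cons, if_neg hop]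
          rw [refCigarScore_foldl, ih ref_len [] (by simp), List.nil_append]
          simp [refCigarScore]

-- ===== VERDICT (by name: the statement is the Claim_ definition above) =====
theorem reference_len_from_cigar_spec : Claim_equal_reference_len_from_cigar := by
  intro cigar default_k _
  unfold Spec_reference_len_from_cigar reference_len_from_cigar reference_len_from_cigar_alt
  cases cigar with
  | none => rfl
  | some s =>
    simp only []
    by_cases h : s.toList = []
    · rw [if_pos h, if_pos h]
    · rw [if_neg h, if_neg h]
      have := refCigarGoA_eq s.toList 0 [] (by simp)
      rw [this, List.nil_append]
      simp [refCigarScore]
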